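-- pv_equiv track=rewrite | github.com/alexeybutyrev/codeforcessolutions | 119A.py | solution
-- ===== SOURCE A (Python) =====
-- def solution(S):
--     UF = {}
--     def find(x):
--         if x != UF[x]:
--             UF[x] = find(UF[x])
--         return UF[x]
--
--     def union(x,y):
--         UF.setdefault(x,x)
--         UF.setdefault(y,y)
--         UF[find(x)] = find(y)
--
--     N = len(S)
--     for i in range(N-1):
--         union(i,i)
--         if S[i] == "E":
--             union(i,i+1)
--     union(N-1,N-1)
--     if S[N-1] == "E":
--         union(0,N-1)
--     for i in range(N-1):
--         if S[i] == "N":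
--             if find(i) == find(i+1):
--                 return 'NO'
--     if S[N-1] == "N" and find(0) == find(N-1):
--         return 'NO'
--     return 'YES'
-- ===== SOURCE B (Python) =====
-- def solution(S):
--     # NO exactly when the constraints are inconsistent: a single 'N' edge whose
--     # complementary arc consists entirely of 'E' edges, i.e. exactly one 'N'
--     # and every other character 'E'.
--     return 'NO' if S.count('N') == 1 and S.count('E') == len(S) - 1 else 'YES'
-- ===== Notes on version B (the rewrite author's own statement) =====
-- stated objective: faster
-- what changed: Replaced the union-find simulation over all cycle edges by the closed form: the answer is 'NO' exactly when S contains exactly one 'N' and every other character is 'E' (only then does an N-edge join two already-E-connected vertices), so B just compares two character counts.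
-- outside the precondition, e.g. on solution(''): A raises IndexError, B returns 'YES'
import Mathlib
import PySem

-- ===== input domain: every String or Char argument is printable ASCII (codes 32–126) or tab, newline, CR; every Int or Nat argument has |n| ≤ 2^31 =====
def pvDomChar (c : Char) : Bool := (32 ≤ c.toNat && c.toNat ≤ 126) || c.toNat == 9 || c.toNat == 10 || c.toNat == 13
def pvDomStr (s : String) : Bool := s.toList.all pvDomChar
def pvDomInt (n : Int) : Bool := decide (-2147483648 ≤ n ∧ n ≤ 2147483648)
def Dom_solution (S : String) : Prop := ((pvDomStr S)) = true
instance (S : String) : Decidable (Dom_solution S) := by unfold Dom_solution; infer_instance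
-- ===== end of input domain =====

-- B replaces A's dict-backed union-find over the cycle's edges by the closed form
-- "exactly one 'N' and every other character 'E'" (objective: faster).

-- ===== PORT A =====
-- find(x) with path compression; Python's UF[x] raises KeyError on a missing key but A
-- only ever calls find on keys it has inserted, so getD x x is exact there; the fuel
-- only makes the recursion structural and is never exhausted on A's calls.
def findA (fuel : Nat) (uf : PySem.Dict Int Int) (x : Int) : Int × PySem.Dict Int Int :=
  match fuel with
  | 0 => (x, uf)
  | Nat.succ f =>
    let px := uf.getD x x                 -- UF[x]
    if x ≠ px then
      let r := findA f uf px              -- UF[x] = find(UF[x])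
      (r.1, r.2.insert x r.1)             -- return UF[x]
    else (px, uf)

-- union(x,y): setdefaults, then UF[find(x)] = find(y) (Python evaluates the RHS first)
def unionA (fuel : Nat) (uf : PySem.Dict Int Int) (x y : Int) : PySem.Dict Int Int :=
  let uf1 := (uf.setdefault x x).setdefault y y
  let ry := findA fuel uf1 y
  let rx := findA fuel ry.2 x
  rx.2.insert rx.1 ry.1

-- the second for-loop with its early 'return NO', then the final wrap-around check;
-- S[i] via pyGet? (none = IndexError, outside Pre_)
def checkA (fuel : Nat) (S : String) (N : Int) (uf : PySem.Dict Int Int) : List Int → String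
  | [] =>
    if PySem.Str.pyGet? S (N - 1) = some 'N' then
      let r0 := findA fuel uf 0
      let rn := findA fuel r0.2 (N - 1)
      if r0.1 = rn.1 then "NO" else "YES"
    else "YES"
  | i :: rest =>
    if PySem.Str.pyGet? S i = some 'N' then
      let ri := findA fuel uf i
      let rj := findA fuel ri.2 (i + 1)
      if ri.1 = rj.1 then "NO" else checkA fuel S N rj.2 rest
    else checkA fuel S N uf rest

def solution (S : String) : String :=
  let N : Int := PySem.Str.len S
  let fuel : Nat := S.toList.length + 1
  let uf0 := (PySem.List.pyRange 0 (N - 1) 1).foldl (fun uf i =>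
    let uf' := unionA fuel uf i i
    if PySem.Str.pyGet? S i = some 'E' then unionA fuel uf' i (i + 1) else uf') PySem.Dict.empty
  let uf1 := unionA fuel uf0 (N - 1) (N - 1)
  let uf2 := if PySem.Str.pyGet? S (N - 1) = some 'E' then unionA fuel uf1 0 (N - 1) else uf1
  checkA fuel S N uf2 (PySem.List.pyRange 0 (N - 1) 1)

-- ===== PORT B =====
def solution_alt (S : String) : String :=
  if PySem.Str.count S "N" = 1 ∧ (PySem.Str.count S "E" : Int) = PySem.Str.len S - 1
  then "NO" else "YES"

-- ===== PRECONDITION & SPEC =====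
-- Pre_ excludes only the empty string, on which A raises IndexError (it reads S[N-1] with N = 0).
def Pre_solution (S : String) : Prop := S.toList ≠ []
instance (S : String) : Decidable (Pre_solution S) := by unfold Pre_solution; infer_instance
def pvWitness_solution : String := "EN"

def Spec_solution (S : String) (out : String) : Prop := out = solution_alt S
instance (S : String) (out : String) : Decidable (Spec_solution S out) := by unfold Spec_solution; infer_instance

-- ===== CLAIM (what is proved, stated in full; the proofs are below) =====
def Claim_equal_solution : Prop := ∀ (S : String), Dom_solution S → Pre_solution S → Spec_solution S (solution S)
-- ===== LEMMAS AND PROOFS =====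

-- the dict seen as a total parent function (getD z z = z on absent keys)
def ufView (uf : PySem.Dict Int Int) : Int → Int := fun z => uf.getD z z
def updF (p : Int → Int) (a v : Int) : Int → Int := fun z => if z = a then v else p z
-- parents never decrease and stay below N-1: makes every find terminate within its fuel
def UFInv (p : Int → Int) (N : Int) : Prop := ∀ x, p x = x ∨ (x < p x ∧ p x ≤ N - 1)
def rootF (p : Int → Int) : Nat → Int → Int
  | 0, x => x
  | f + 1, x => if p x = x then x else rootF p f (p x)
def rootP (p : Int → Int) (N x : Int) : Int := rootF p ((N - 1 - x).toNat + 1) x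

theorem rootF_stab (p : Int → Int) (N : Int) (hInv : UFInv p N) :
    ∀ f f' x, (N - 1 - x).toNat < f → (N - 1 - x).toNat < f' → rootF p f x = rootF p f' x := by
  intro f
  induction f with
  | zero => intro f' x h _; omega
  | succ g ih =>
    intro f' x h h'
    cases f' with
    | zero => omega
    | succ g' =>
      simp only [rootF]
      by_cases hp : p x = x
      · simp [hp]
      · rcases hInv x with h1 | ⟨h2, h3⟩
        · exact absurd h1 hp
        · simp only [if_neg hp]
          exact ih g' (p x) (by omega) (by omega)

theorem rootP_eq_rootF (p : Int → Int) (N : Int) (hInv : UFInv p N) (f : Nat) (x : Int)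
    (hf : (N - 1 - x).toNat < f) : rootF p f x = rootP p N x := by
  exact rootF_stab p N hInv f ((N - 1 - x).toNat + 1) x hf (by omega)

theorem rootP_id (p : Int → Int) (N x : Int) (h : p x = x) : rootP p N x = x := by
  simp [rootP, rootF, h]

theorem rootP_step (p : Int → Int) (N : Int) (hInv : UFInv p N) (x : Int) (h : p x ≠ x) :
    rootP p N x = rootP p N (p x) := by
  rcases hInv x with h1 | ⟨h2, h3⟩
  · exact absurd h1 h
  · simp only [rootP, rootF, if_neg h]
    exact rootP_eq_rootF p N hInv _ _ (by omega)

theorem rootP_fix (p : Int → Int) (N : Int) (hInv : UFInv p N) (x : Int) :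
    p (rootP p N x) = rootP p N x := by
  have main : ∀ t x, (N - 1 - x).toNat ≤ t → p (rootP p N x) = rootP p N x := by
    intro t
    induction t with
    | zero =>
      intro x hx
      by_cases h : p x = x
      · rw [rootP_id p N x h]; exact h
      · rcases hInv x with h1 | ⟨h2, h3⟩
        · exact absurd h1 h
        · omega
    | succ t ih =>
      intro x hx
      by_cases h : p x = x
      · rw [rootP_id p N x h]; exact h
      · rcases hInv x with h1 | ⟨h2, h3⟩
        · exact absurd h1 h
        · rw [rootP_step p N hInv x h]
          exact ih (p x) (by omega)
  exact main _ x le_rfl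

theorem rootP_ge (p : Int → Int) (N : Int) (hInv : UFInv p N) (x : Int) : x ≤ rootP p N x := by
  have main : ∀ t x, (N - 1 - x).toNat ≤ t → x ≤ rootP p N x := by
    intro t
    induction t with
    | zero =>
      intro x hx
      by_cases h : p x = x
      · rw [rootP_id p N x h]
      · rcases hInv x with h1 | ⟨h2, h3⟩
        · exact absurd h1 h
        · omega
    | succ t ih =>
      intro x hx
      by_cases h : p x = x
      · rw [rootP_id p N x h]
      · rcases hInv x with h1 | ⟨h2, h3⟩
        · exact absurd h1 h
        · rw [rootP_step p N hInv x h]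
          have := ih (p x) (by omega)
          omega
  exact main _ x le_rfl

theorem rootP_le (p : Int → Int) (N : Int) (hInv : UFInv p N) (x : Int) (hx : x ≤ N - 1) :
    rootP p N x ≤ N - 1 := by
  have main : ∀ t x, (N - 1 - x).toNat ≤ t → x ≤ N - 1 → rootP p N x ≤ N - 1 := by
    intro t
    induction t with
    | zero =>
      intro x hx hxN
      by_cases h : p x = x
      · rw [rootP_id p N x h]; exact hxN
      · rcases hInv x with h1 | ⟨h2, h3⟩
        · exact absurd h1 h
        · omega
    | succ t ih =>
      intro x hx hxN
      by_cases h : p x = x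
      · rw [rootP_id p N x h]; exact hxN
      · rcases hInv x with h1 | ⟨h2, h3⟩
        · exact absurd h1 h
        · rw [rootP_step p N hInv x h]
          exact ih (p x) (by omega) h3
  exact main _ x le_rfl hx

theorem UFInv_updF (p : Int → Int) (N a v : Int) (hInv : UFInv p N) (hav : a ≤ v)
    (hvN : v ≤ N - 1) : UFInv (updF p a v) N := by
  intro z
  by_cases hz : z = a
  · subst hz
    have e : updF p z v z = v := by simp [updF]
    rw [e]
    rcases eq_or_lt_of_le hav with h | h
    · left; exact h.symm
    · right; exact ⟨h, hvN⟩
  · have e : updF p a v z = p z := by simp [updF, hz]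
    rw [e]
    exact hInv z

-- the one union-find workhorse: overwriting entry a (whose root is ≤ v) with a root v
-- redirects exactly the class of a onto v and changes no other root
theorem rootP_updF (p : Int → Int) (N a v : Int) (hInv : UFInv p N)
    (hav : a ≤ v) (hvN : v ≤ N - 1) (hpv : p v = v) (hr : rootP p N a ≤ v)
    (hcase : v = rootP p N a ∨ p a = a) :
    ∀ x, rootP (updF p a v) N x = if rootP p N x = rootP p N a then v else rootP p N x := by
  have hInv' : UFInv (updF p a v) N := UFInv_updF p N a v hInv hav hvN
  have main : ∀ t x, (N - 1 - x).toNat ≤ t →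
      rootP (updF p a v) N x = if rootP p N x = rootP p N a then v else rootP p N x := by
    intro t
    induction t using Nat.strong_induction_on with
    | _ t ih =>
      intro x hx
      by_cases hxa : x = a
      · subst hxa
        by_cases hva : v = x
        · have hpa : updF p x v x = x := by simp [updF, hva]
          rw [rootP_id _ _ _ hpa, if_pos rfl, hva]
        · have hpa : updF p x v x = v := by simp [updF]
          have h1 : rootP (updF p x v) N x = rootP (updF p x v) N v := by
            have := rootP_step _ _ hInv' x (by rw [hpa]; exact fun h => hva h)
            rwa [hpa] at this
          have h2 : updF p x v v = v := by
            simp only [updF, if_neg hva]; exact hpv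
          rw [h1, rootP_id _ _ _ h2, if_pos rfl]
      · have hpx' : updF p a v x = p x := by simp [updF, hxa]
        by_cases hp : p x = x
        · rw [rootP_id _ _ _ (by rw [hpx']; exact hp), rootP_id _ _ _ hp]
          rcases hcase with hv | hroot
          · by_cases hxr : x = rootP p N a
            · rw [if_pos hxr, hv, hxr]
            · rw [if_neg hxr]
          · rw [rootP_id _ _ _ hroot, if_neg hxa]
        · rcases hInv x with h1 | ⟨h2, h3⟩
          · exact absurd h1 hp
          · have hstep' : rootP (updF p a v) N x = rootP (updF p a v) N (p x) := by
              have := rootP_step _ _ hInv' x (by rw [hpx']; exact hp)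
              rwa [hpx'] at this
            rw [hstep', ih (N - 1 - p x).toNat (by omega) (p x) le_rfl,
              rootP_step p N hInv x hp]
  intro x
  exact main _ x le_rfl

theorem ufView_insert (uf : PySem.Dict Int Int) (k w : Int) :
    ufView (uf.insert k w) = updF (ufView uf) k w := by
  funext z
  simp [ufView, updF, PySem.Dict.getD_insert]

theorem ufView_setdefault (uf : PySem.Dict Int Int) (k : Int) :
    ufView (uf.setdefault k k) = ufView uf := by
  funext z
  by_cases hz : z = k
  · simp only [ufView]
    rw [hz]
    exact PySem.Dict.getD_setdefault_self uf k k k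
  · simp only [ufView]
    rw [PySem.Dict.getD_eq_get?_getD, PySem.Dict.get?_setdefault_of_ne uf k hz,
      ← PySem.Dict.getD_eq_get?_getD]

theorem findA_spec (N : Int) :
    ∀ (fuel : Nat) (uf : PySem.Dict Int Int) (x : Int), UFInv (ufView uf) N → 0 ≤ x →
    (N - 1 - x).toNat < fuel →
    (findA fuel uf x).1 = rootP (ufView uf) N x ∧ UFInv (ufView (findA fuel uf x).2) N ∧
    ∀ y, rootP (ufView (findA fuel uf x).2) N y = rootP (ufView uf) N y := by
  intro fuel
  induction fuel with
  | zero => intro uf x _ _ h; omega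
  | succ f ih =>
    intro uf x hInv hx0 hf
    have hunf : findA (f + 1) uf x =
        if x ≠ uf.getD x x then
          ((findA f uf (uf.getD x x)).1,
           (findA f uf (uf.getD x x)).2.insert x (findA f uf (uf.getD x x)).1)
        else (uf.getD x x, uf) := rfl
    have hview : ufView uf x = uf.getD x x := rfl
    by_cases hne : x ≠ uf.getD x x
    · rw [hunf, if_pos hne]
      have hpx : ufView uf x ≠ x := by rw [hview]; exact fun h => hne h.symm
      rcases hInv x with h1 | ⟨h2, h3⟩
      · exact absurd h1 hpx
      · rw [hview] at h2 h3
        obtain ⟨e1, hInv2, hpres2⟩ := ih uf (uf.getD x x) hInv (by omega) (by omega)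
        have estep : rootP (ufView uf) N x = rootP (ufView uf) N (uf.getD x x) :=
          rootP_step (ufView uf) N hInv x hpx
        have hxN : x ≤ N - 1 := by omega
        have hR1 : (findA f uf (uf.getD x x)).1 = rootP (ufView uf) N x := by
          rw [e1, ← estep]
        set p2 := ufView (findA f uf (uf.getD x x)).2 with hp2
        have hvins : ufView ((findA f uf (uf.getD x x)).2.insert x (findA f uf (uf.getD x x)).1)
            = updF p2 x (rootP (ufView uf) N x) := by
          rw [ufView_insert, hR1]
        have hav : x ≤ rootP (ufView uf) N x := rootP_ge (ufView uf) N hInv x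
        have hvN : rootP (ufView uf) N x ≤ N - 1 := rootP_le (ufView uf) N hInv x hxN
        have hfixv : p2 (rootP (ufView uf) N x) = rootP (ufView uf) N x := by
          rw [← hpres2 x]
          exact rootP_fix p2 N hInv2 x
        have hroots := rootP_updF p2 N x (rootP (ufView uf) N x) hInv2 hav hvN hfixv
          (by rw [hpres2 x]) (Or.inl (hpres2 x).symm)
        refine ⟨hR1, ?_, ?_⟩
        · rw [hvins]
          exact UFInv_updF p2 N x (rootP (ufView uf) N x) hInv2 hav hvN
        · intro y
          rw [hvins, hroots y, hpres2 x, hpres2 y]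
          by_cases hy : rootP (ufView uf) N y = rootP (ufView uf) N x
          · rw [if_pos hy, hy]
          · rw [if_neg hy]
    · rw [hunf, if_neg hne]
      rw [not_not] at hne
      refine ⟨?_, hInv, fun y => rfl⟩
      show uf.getD x x = rootP (ufView uf) N x
      rw [(rootP_id (ufView uf) N x (by rw [hview, ← hne])), ← hne]

theorem unionA_spec (N : Int) (fuel : Nat) (uf : PySem.Dict Int Int) (x y : Int)
    (hInv : UFInv (ufView uf) N) (hx0 : 0 ≤ x) (hy0 : 0 ≤ y) (hyN : y ≤ N - 1)
    (hfx : (N - 1 - x).toNat < fuel) (hfy : (N - 1 - y).toNat < fuel)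
    (hle : rootP (ufView uf) N x ≤ rootP (ufView uf) N y) :
    UFInv (ufView (unionA fuel uf x y)) N ∧
    ∀ z, rootP (ufView (unionA fuel uf x y)) N z =
      if rootP (ufView uf) N z = rootP (ufView uf) N x then rootP (ufView uf) N y
      else rootP (ufView uf) N z := by
  have hview : ufView ((uf.setdefault x x).setdefault y y) = ufView uf := by
    rw [ufView_setdefault, ufView_setdefault]
  have hunf : unionA fuel uf x y =
      (findA fuel (findA fuel ((uf.setdefault x x).setdefault y y) y).2 x).2.insert
        (findA fuel (findA fuel ((uf.setdefault x x).setdefault y y) y).2 x).1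
        (findA fuel ((uf.setdefault x x).setdefault y y) y).1 := rfl
  obtain ⟨ey, hInv3, hpres3⟩ := findA_spec N fuel ((uf.setdefault x x).setdefault y y) y
    (by rw [hview]; exact hInv) hy0 hfy
  rw [hview] at ey
  have hpres3' : ∀ z, rootP (ufView (findA fuel ((uf.setdefault x x).setdefault y y) y).2) N z
      = rootP (ufView uf) N z := by
    intro z; rw [hpres3 z, hview]
  obtain ⟨ex, hInv4, hpres4⟩ :=
    findA_spec N fuel (findA fuel ((uf.setdefault x x).setdefault y y) y).2 x hInv3 hx0 hfx
  rw [hpres3' x] at ex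
  have hpres4' : ∀ z,
      rootP (ufView (findA fuel (findA fuel ((uf.setdefault x x).setdefault y y) y).2 x).2) N z
      = rootP (ufView uf) N z := by
    intro z; rw [hpres4 z, hpres3' z]
  set p4 := ufView (findA fuel (findA fuel ((uf.setdefault x x).setdefault y y) y).2 x).2 with hp4
  have hfixa : p4 (rootP (ufView uf) N x) = rootP (ufView uf) N x := by
    rw [← hpres4' x]; exact rootP_fix p4 N hInv4 x
  have hroota : rootP p4 N (rootP (ufView uf) N x) = rootP (ufView uf) N x :=
    rootP_id p4 N _ hfixa
  have hfixv : p4 (rootP (ufView uf) N y) = rootP (ufView uf) N y := by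
    rw [← hpres4' y]; exact rootP_fix p4 N hInv4 y
  have hA0 : 0 ≤ rootP (ufView uf) N x :=
    le_trans hx0 (rootP_ge (ufView uf) N hInv x)
  have hvN : rootP (ufView uf) N y ≤ N - 1 := rootP_le (ufView uf) N hInv y hyN
  have hvins : ufView (unionA fuel uf x y)
      = updF p4 (rootP (ufView uf) N x) (rootP (ufView uf) N y) := by
    rw [hunf, ufView_insert, ex, ey]
  have hroots := rootP_updF p4 N (rootP (ufView uf) N x) (rootP (ufView uf) N y) hInv4
    hle hvN hfixv (by rw [hroota]; exact hle) (Or.inr hfixa)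
  constructor
  · rw [hvins]
    exact UFInv_updF p4 N _ _ hInv4 hle hvN
  · intro z
    rw [hvins, hroots z, hroota, hpres4' z]

-- run end: first index ≥ j that is not an 'E' strictly below the bound M
def runEnd (L : List Char) (M : Nat) (j : Nat) : Nat :=
  if h : j < M ∧ L[j]? = some 'E' then runEnd L M (j + 1) else j
termination_by M - j
decreasing_by omega

theorem runEnd_ge (L : List Char) (M : Nat) : ∀ j, j ≤ runEnd L M j := by
  have main : ∀ t j, M - j ≤ t → j ≤ runEnd L M j := by
    intro t
    induction t with
    | zero =>
      intro j hj
      rw [runEnd, dif_neg (by omega)]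
    | succ t ih =>
      intro j hj
      rw [runEnd]
      split_ifs with h
      · have := ih (j + 1) (by omega)
        omega
      · exact le_rfl
  intro j
  exact main _ j le_rfl

theorem runEnd_le (L : List Char) (M : Nat) : ∀ j, j ≤ M → runEnd L M j ≤ M := by
  have main : ∀ t j, M - j ≤ t → j ≤ M → runEnd L M j ≤ M := by
    intro t
    induction t with
    | zero =>
      intro j hj hjM
      rw [runEnd, dif_neg (by omega)]
      exact hjM
    | succ t ih =>
      intro j hj hjM
      rw [runEnd]
      split_ifs with h
      · exact ih (j + 1) (by omega) (by omega)
      · exact hjM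
  intro j hj
  exact main _ j le_rfl hj

theorem runEnd_between (L : List Char) (M : Nat) :
    ∀ j k, j ≤ k → k < runEnd L M j → k < M ∧ L[k]? = some 'E' := by
  have main : ∀ t j k, M - j ≤ t → j ≤ k → k < runEnd L M j → k < M ∧ L[k]? = some 'E' := by
    intro t
    induction t with
    | zero =>
      intro j k hj hjk hk
      rw [runEnd, dif_neg (by omega)] at hk
      omega
    | succ t ih =>
      intro j k hj hjk hk
      rw [runEnd] at hk
      split_ifs at hk with h
      · rcases Nat.eq_or_lt_of_le hjk with he | hlt
        · exact he ▸ h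
        · exact ih (j + 1) k (by omega) hlt hk
      · omega
  intro j k hjk hk
  exact main _ j k le_rfl hjk hk

theorem runEnd_of_allE (L : List Char) (M : Nat) :
    ∀ j i, j ≤ i → (∀ k, j ≤ k → k < i → k < M ∧ L[k]? = some 'E') →
    ¬ (i < M ∧ L[i]? = some 'E') → runEnd L M j = i := by
  have main : ∀ t j i, i - j ≤ t → j ≤ i → (∀ k, j ≤ k → k < i → k < M ∧ L[k]? = some 'E') →
      ¬ (i < M ∧ L[i]? = some 'E') → runEnd L M j = i := by
    intro t
    induction t with
    | zero =>
      intro j i ht hji hall hstop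
      have : j = i := by omega
      subst this
      rw [runEnd, dif_neg hstop]
    | succ t ih =>
      intro j i ht hji hall hstop
      rcases Nat.eq_or_lt_of_le hji with he | hlt
      · subst he
        rw [runEnd, dif_neg hstop]
      · rw [runEnd, dif_pos (hall j le_rfl hlt)]
        exact ih (j + 1) i (by omega) hlt (fun k hk1 hk2 => hall k (by omega) hk2) hstop
  intro j i hji hall hstop
  exact main _ j i le_rfl hji hall hstop

theorem runEnd_eq_bound_iff (L : List Char) (M : Nat) (j : Nat) (hj : j ≤ M) :
    runEnd L M j = M ↔ ∀ k, j ≤ k → k < M → L[k]? = some 'E' := by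
  constructor
  · intro he k hk1 hk2
    exact (runEnd_between L M j k hk1 (by omega)).2
  · intro hall
    exact runEnd_of_allE L M j M hj (fun k hk1 hk2 => ⟨hk2, hall k hk1 hk2⟩) (by omega)

theorem runEnd_succ_E (L : List Char) (c : Nat) (hc : L[c]? = some 'E') :
    ∀ j, runEnd L (c + 1) j = if runEnd L c j = c then c + 1 else runEnd L c j := by
  have main : ∀ t j, c + 1 - j ≤ t →
      runEnd L (c + 1) j = if runEnd L c j = c then c + 1 else runEnd L c j := by
    intro t
    induction t with
    | zero =>
      intro j hj
      have h1 : runEnd L (c + 1) j = j := by rw [runEnd, dif_neg (by omega)]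
      have h2 : runEnd L c j = j := by rw [runEnd, dif_neg (by omega)]
      rw [h1, h2, if_neg (by omega)]
    | succ t ih =>
      intro j hj
      rcases Nat.lt_trichotomy j c with hlt | heq | hgt
      · by_cases hE : L[j]? = some 'E'
        · rw [runEnd, dif_pos ⟨by omega, hE⟩]
          conv_rhs => rw [runEnd, dif_pos ⟨hlt, hE⟩]
          exact ih (j + 1) (by omega)
        · have h1 : runEnd L (c + 1) j = j := by
            rw [runEnd, dif_neg (by intro h; exact hE h.2)]
          have h2 : runEnd L c j = j := by
            rw [runEnd, dif_neg (by intro h; exact hE h.2)]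
          rw [h1, h2, if_neg (by omega)]
      · subst heq
        have h2 : runEnd L j j = j := by rw [runEnd, dif_neg (by omega)]
        rw [runEnd, dif_pos ⟨by omega, hc⟩, runEnd, dif_neg (by omega), h2, if_pos rfl]
      · have h1 : runEnd L (c + 1) j = j := by rw [runEnd, dif_neg (by omega)]
        have h2 : runEnd L c j = j := by rw [runEnd, dif_neg (by omega)]
        rw [h1, h2, if_neg (by omega)]
  intro j
  exact main _ j le_rfl

theorem runEnd_succ_notE (L : List Char) (c : Nat) (hc : L[c]? ≠ some 'E') :
    ∀ j, runEnd L (c + 1) j = runEnd L c j := by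
  have main : ∀ t j, c + 1 - j ≤ t → runEnd L (c + 1) j = runEnd L c j := by
    intro t
    induction t with
    | zero =>
      intro j hj
      rw [runEnd, dif_neg (by omega), runEnd, dif_neg (by omega)]
    | succ t ih =>
      intro j hj
      rcases Nat.lt_trichotomy j c with hlt | heq | hgt
      · by_cases hE : L[j]? = some 'E'
        · rw [runEnd, dif_pos ⟨by omega, hE⟩]
          conv_rhs => rw [runEnd, dif_pos ⟨hlt, hE⟩]
          exact ih (j + 1) (by omega)
        · rw [runEnd, dif_neg (by intro h; exact hE h.2), runEnd,
            dif_neg (by intro h; exact hE h.2)]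
      · subst heq
        rw [runEnd, dif_neg (by intro h; exact hc h.2), runEnd, dif_neg (by omega)]
      · rw [runEnd, dif_neg (by omega), runEnd, dif_neg (by omega)]
  intro j
  exact main _ j le_rfl

-- abstract roots during/after the build loop: run ends with bound c
def rbF (L : List Char) (c : Nat) : Int → Int :=
  fun z => if 0 ≤ z then ((runEnd L c z.toNat : Nat) : Int) else z

theorem allE_getElem (t : List Char) :
    (∀ b ∈ t, b = 'E') ↔ ∀ k, k < t.length → t[k]? = some 'E' := by
  constructor
  · intro h k hk
    rw [List.getElem?_eq_getElem hk]
    exact congrArg some (h _ (List.getElem_mem hk))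
  · intro h b hb
    obtain ⟨i, hi⟩ := List.mem_iff_getElem?.1 hb
    obtain ⟨hlt, heq⟩ := List.getElem?_eq_some_iff.1 hi
    have := h i hlt
    rw [List.getElem?_eq_getElem hlt] at this
    have : t[i] = 'E' := Option.some.inj this
    rw [← heq, this]

-- roots after the wrap-around union: the class of index 0 is redirected onto N-1
def wrapR (L : List Char) (M : Nat) : Int → Int :=
  fun z => if rbF L M z = rbF L M 0 then ((M : Nat) : Int) else rbF L M z

-- counting lemma for B's closed form
theorem counts_iff (L : List Char) :
    (L.count 'N' = 1 ∧ L.count 'E' + 1 = L.length) ↔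
    ∃ i, i < L.length ∧ L[i]? = some 'N' ∧ ∀ k, k < L.length → k ≠ i → L[k]? = some 'E' := by
  induction L with
  | nil => simp
  | cons c t ih =>
    by_cases hcN : c = 'N'
    · subst hcN
      have lhs_iff : (('N' :: t).count 'N' = 1 ∧ ('N' :: t).count 'E' + 1 = ('N' :: t).length) ↔
          ∀ b ∈ t, b = 'E' := by
        rw [List.count_cons, if_pos (by decide), List.count_cons, if_neg (by decide),
          List.length_cons]
        constructor
        · rintro ⟨h1, h2⟩ b hb
          have hall := List.count_eq_length.1 (by omega : t.count 'E' = t.length)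
          exact (hall b hb).symm
        · intro hall
          have h2 : t.count 'E' = t.length := List.count_eq_length.2 (fun b hb => (hall b hb).symm)
          have h1 : t.count 'N' = 0 := List.count_eq_zero.2 (fun hmem => by
            have := hall _ hmem; exact absurd this (by decide))
          omega
      have rhs_iff : (∃ i, i < ('N' :: t).length ∧ ('N' :: t)[i]? = some 'N' ∧
          ∀ k, k < ('N' :: t).length → k ≠ i → ('N' :: t)[k]? = some 'E') ↔ ∀ b ∈ t, b = 'E' := by
        constructor
        · rintro ⟨i, hi, hsome, hall⟩
          rw [allE_getElem]
          intro k hk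
          cases i with
          | zero =>
            have := hall (k + 1) (by simpa using Nat.succ_lt_succ hk) (by omega)
            simpa using this
          | succ j =>
            have := hall 0 (by simp) (by omega)
            simp at this
        · intro hall
          refine ⟨0, by simp, by simp, ?_⟩
          intro k hk hk0
          obtain ⟨k', rfl⟩ : ∃ k', k = k' + 1 := ⟨k - 1, by omega⟩
          simpa using (allE_getElem t).1 hall k' (by simpa using hk)
      rw [lhs_iff, rhs_iff]
    · by_cases hcE : c = 'E'
      · subst hcE
        have lhs_iff : (('E' :: t).count 'N' = 1 ∧ ('E' :: t).count 'E' + 1 = ('E' :: t).length) ↔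
            (t.count 'N' = 1 ∧ t.count 'E' + 1 = t.length) := by
          rw [List.count_cons, if_neg (by decide), List.count_cons, if_pos (by decide),
            List.length_cons]
          omega
        rw [lhs_iff, ih]
        constructor
        · rintro ⟨j, hj, hsome, hall⟩
          refine ⟨j + 1, by simpa using Nat.succ_lt_succ hj, by simpa using hsome, ?_⟩
          intro k hk hkj
          cases k with
          | zero => simp
          | succ k' => simpa using hall k' (by simpa using hk) (by omega)
        · rintro ⟨i, hi, hsome, hall⟩
          cases i with
          | zero => simp at hsome
          | succ j =>
            refine ⟨j, by simpa using hi, by simpa using hsome, ?_⟩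
            intro k hk hkj
            simpa using hall (k + 1) (by simpa using Nat.succ_lt_succ hk) (by omega)
      · constructor
        · rintro ⟨h1, h2⟩
          exfalso
          rw [List.count_cons, if_neg (by simp [beq_iff_eq, hcN])] at h1
          rw [List.count_cons, if_neg (by simp [beq_iff_eq, hcE]), List.length_cons] at h2
          have hall := List.count_eq_length.1 (by omega : t.count 'E' = t.length)
          have h0 : t.count 'N' = 0 := List.count_eq_zero.2 (fun hmem => by
            have := hall _ hmem; exact absurd this.symm (by decide))
          omega
        · rintro ⟨i, hi, hsome, hall⟩
          exfalso
          cases i with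
          | zero =>
            simp only [List.getElem?_cons_zero] at hsome
            exact hcN (Option.some.inj hsome)
          | succ j =>
            have := hall 0 (by simp) (by omega)
            simp only [List.getElem?_cons_zero] at this
            exact hcE (Option.some.inj this)

theorem count_go_singleton (c : Char) :
    ∀ (l : List Char) (fuel acc : Nat), l.length ≤ fuel →
    PySem.Chars.count.go [c] fuel l acc = acc + l.count c := by
  intro l
  induction l with
  | nil =>
    intro fuel acc h
    cases fuel <;> simp [PySem.Chars.count.go]
  | cons h t ih =>
    intro fuel acc hlen
    cases fuel with
    | zero => simp at hlen
    | succ f =>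
      have hpre : [c].isPrefixOf (h :: t) = (c == h) := by
        simp [List.isPrefixOf]
      rw [PySem.Chars.count.go]
      by_cases hc : c = h
      · rw [hpre, if_pos (by simp [hc])]
        have hdrop : List.drop [c].length (h :: t) = t := rfl
        rw [hdrop, ih f (acc + 1) (by simpa using hlen)]
        rw [List.count_cons, if_pos (by simp [hc])]
        omega
      · rw [hpre, if_neg (by simp [hc])]
        rw [ih f acc (by simpa using hlen)]
        rw [List.count_cons, if_neg (by simp [beq_iff_eq]; exact fun e => hc e.symm)]
        omega

theorem chars_count_singleton (s : List Char) (c : Char) :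
    PySem.Chars.count s [c] = s.count c := by
  rw [PySem.Chars.count]
  rw [if_neg (by simp)]
  rw [count_go_singleton c s s.length 0 le_rfl]
  omega

-- the first for-loop: after processing prefix [0,c) the classes are exactly the maximal
-- runs of 'E'-joined indices, i.e. every root is the run end below bound c
theorem buildA_spec (S : String) (L : List Char) (hLdef : L = S.toList) (M : Nat)
    (N : Int) (hN : N = (M : Int) + 1) (fuel : Nat) (hfuel : fuel = M + 2) :
    ∀ c : Nat, c ≤ M →
    UFInv (ufView ((PySem.List.pyRange 0 (c : Int) 1).foldl
      (fun uf i =>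
        let uf' := unionA fuel uf i i
        if PySem.Str.pyGet? S i = some 'E' then unionA fuel uf' i (i + 1) else uf')
      PySem.Dict.empty)) N ∧
    ∀ z, rootP (ufView ((PySem.List.pyRange 0 (c : Int) 1).foldl
      (fun uf i =>
        let uf' := unionA fuel uf i i
        if PySem.Str.pyGet? S i = some 'E' then unionA fuel uf' i (i + 1) else uf')
      PySem.Dict.empty)) N z = rbF L c z := by
  intro c
  induction c with
  | zero =>
    intro _
    simp only [Nat.cast_zero]
    rw [PySem.List.pyRange_one_eq_nil le_rfl]
    simp only [List.foldl_nil]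
    have hid : ufView (PySem.Dict.empty : PySem.Dict Int Int) = fun z => z := by
      funext z
      simp [ufView, PySem.Dict.getD_empty]
    rw [hid]
    constructor
    · intro x; left; rfl
    · intro z
      rw [rootP_id _ _ _ rfl]
      by_cases hz : 0 ≤ z
      · rw [rbF, if_pos hz, runEnd, dif_neg (by omega)]
        exact (Int.toNat_of_nonneg hz).symm
      · rw [rbF, if_neg hz]
  | succ c ih =>
    intro hc1
    have hc : c ≤ M := by omega
    obtain ⟨hInvc, hrootc⟩ := ih hc
    have hcast : ((c + 1 : Nat) : Int) = (c : Int) + 1 := by push_cast; ring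
    rw [hcast, PySem.List.pyRange_one_succ_right (by positivity), List.foldl_append,
      List.foldl_cons, List.foldl_nil]
    have hcN : (c : Int) ≤ N - 1 := by omega
    have hfc : (N - 1 - (c : Int)).toNat < fuel := by omega
    have hfc1 : (N - 1 - ((c : Int) + 1)).toNat < fuel := by omega
    obtain ⟨hInv', hroot'⟩ := unionA_spec N fuel _ (c : Int) (c : Int) hInvc
      (by positivity) (by positivity) hcN hfc hfc le_rfl
    have hroot'2 : ∀ z, rootP (ufView (unionA fuel ((PySem.List.pyRange 0 (c : Int) 1).foldl
        (fun uf i =>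
          let uf' := unionA fuel uf i i
          if PySem.Str.pyGet? S i = some 'E' then unionA fuel uf' i (i + 1) else uf')
        PySem.Dict.empty) (c : Int) (c : Int))) N z = rbF L c z := by
      intro z
      rw [hroot' z, hrootc]
      split_ifs with h
      · rw [← h]
      · rfl
    have hreC : rbF L c (c : Int) = (c : Int) := by
      rw [rbF, if_pos (by positivity)]
      simp only [Int.toNat_natCast]
      rw [runEnd, dif_neg (by omega)]
    have hreC1 : rbF L c ((c : Int) + 1) = (c : Int) + 1 := by
      rw [rbF, if_pos (by positivity)]
      have : ((c : Int) + 1).toNat = c + 1 := by omega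
      rw [this, runEnd, dif_neg (by omega)]
      push_cast; ring
    show UFInv (ufView (if PySem.Str.pyGet? S (c : Int) = some 'E' then _ else _)) N ∧ _
    by_cases hE : PySem.Str.pyGet? S (c : Int) = some 'E'
    · have hEL : L[c]? = some 'E' := by
        rw [hLdef]
        rw [PySem.Str.pyGet?_natCast] at hE
        exact hE
      rw [if_pos hE]
      obtain ⟨hInv'', hroot''⟩ := unionA_spec N fuel _ (c : Int) ((c : Int) + 1) hInv'
        (by positivity) (by positivity) (by omega) hfc hfc1
        (by rw [hroot'2, hroot'2, hreC, hreC1]; omega)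
      refine ⟨hInv'', ?_⟩
      intro z
      rw [hroot'' z, hroot'2, hroot'2, hroot'2, hreC, hreC1]
      by_cases hz : 0 ≤ z
      · rw [rbF, rbF, if_pos hz, if_pos hz, runEnd_succ_E L c hEL z.toNat]
        by_cases hzc : runEnd L c z.toNat = c
        · rw [if_pos hzc, if_pos (by rw [hzc]), hcast]
        · rw [if_neg hzc, if_neg (by omega)]
      · rw [rbF, rbF, if_neg hz, if_neg hz, if_neg (by omega)]
    · have hEL : L[c]? ≠ some 'E' := by
        intro h
        apply hE
        rw [PySem.Str.pyGet?_natCast, ← hLdef]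
        exact h
      rw [if_neg hE]
      refine ⟨hInv', ?_⟩
      intro z
      rw [hroot'2 z]
      by_cases hz : 0 ≤ z
      · rw [rbF, rbF, if_pos hz, if_pos hz, runEnd_succ_notE L c hEL z.toNat]
      · rw [rbF, rbF, if_neg hz, if_neg hz]

-- the second for-loop with its early return, abstracted over the fixed root function R
theorem checkA_spec (S : String) (L : List Char) (hLdef : L = S.toList) (M : Nat)
    (hM : L.length = M + 1) (N : Int) (hN : N = (M : Int) + 1) (fuel : Nat)
    (hfuel : fuel = M + 2) (R : Int → Int) :
    ∀ (t a : Nat) (uf : PySem.Dict Int Int), M - a ≤ t → a ≤ M →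
    UFInv (ufView uf) N → (∀ z, rootP (ufView uf) N z = R z) →
    ((checkA fuel S N uf (PySem.List.pyRange (a : Int) ((M : Nat) : Int) 1) = "NO" ↔
      ((∃ i : Nat, a ≤ i ∧ i < M ∧ L[i]? = some 'N' ∧ R (i : Int) = R ((i : Int) + 1)) ∨
       (L[M]? = some 'N' ∧ R 0 = R ((M : Nat) : Int)))) ∧
     (checkA fuel S N uf (PySem.List.pyRange (a : Int) ((M : Nat) : Int) 1) = "NO" ∨
      checkA fuel S N uf (PySem.List.pyRange (a : Int) ((M : Nat) : Int) 1) = "YES")) := by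
  have hMN : N - 1 = (M : Int) := by omega
  have hget : PySem.Str.pyGet? S (N - 1) = L[M]? := by
    rw [hMN, hLdef, PySem.Str.pyGet?_natCast]
  have base : ∀ uf : PySem.Dict Int Int, UFInv (ufView uf) N →
      (∀ z, rootP (ufView uf) N z = R z) →
      ((checkA fuel S N uf (PySem.List.pyRange ((M : Nat) : Int) ((M : Nat) : Int) 1) = "NO" ↔
        ((∃ i : Nat, M ≤ i ∧ i < M ∧ L[i]? = some 'N' ∧ R (i : Int) = R ((i : Int) + 1)) ∨
         (L[M]? = some 'N' ∧ R 0 = R ((M : Nat) : Int)))) ∧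
       (checkA fuel S N uf (PySem.List.pyRange ((M : Nat) : Int) ((M : Nat) : Int) 1) = "NO" ∨
        checkA fuel S N uf (PySem.List.pyRange ((M : Nat) : Int) ((M : Nat) : Int) 1) = "YES")) := by
    intro uf hInv hroot
    rw [PySem.List.pyRange_one_eq_nil le_rfl]
    by_cases hlN : L[M]? = some 'N'
    · have hck : checkA fuel S N uf [] =
          if (findA fuel uf 0).1 = (findA fuel (findA fuel uf 0).2 (N - 1)).1
          then "NO" else "YES" := by
        show (if PySem.Str.pyGet? S (N - 1) = some 'N' then _ else _) = _
        rw [hget, if_pos hlN]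
      rw [hck]
      obtain ⟨e0, hInv2, hpres2⟩ := findA_spec N fuel uf 0 hInv le_rfl (by omega)
      obtain ⟨en, _, _⟩ := findA_spec N fuel (findA fuel uf 0).2 (N - 1) hInv2
        (by omega) (by omega)
      rw [hpres2 (N - 1)] at en
      rw [hroot 0] at e0
      rw [hMN, hroot ((M : Nat) : Int)] at en
      constructor
      · split_ifs with h
        · simp only [true_iff]
          refine Or.inr ⟨hlN, ?_⟩
          rw [← e0, ← en]
          rw [hMN] at h
          exact h
        · constructor
          · intro hbad; exact absurd hbad (by decide)
          · rintro (⟨i, h1, h2, _⟩ | ⟨_, hR⟩)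
            · omega
            · exfalso
              apply h
              rw [hMN, e0, en]
              exact hR
      · split_ifs with h
        · left; rfl
        · right; rfl
    · have hck : checkA fuel S N uf [] = "YES" := by
        show (if PySem.Str.pyGet? S (N - 1) = some 'N' then _ else _) = _
        rw [hget, if_neg hlN]
      rw [hck]
      refine ⟨?_, Or.inr rfl⟩
      constructor
      · intro hbad; exact absurd hbad (by decide)
      · rintro (⟨i, h1, h2, _⟩ | ⟨hbad, _⟩)
        · omega
        · exact absurd hbad hlN
  intro t
  induction t with
  | zero =>
    intro a uf ht ha hInv hroot
    have : a = M := by omega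
    subst this
    exact base uf hInv hroot
  | succ t ih =>
    intro a uf ht ha hInv hroot
    rcases Nat.eq_or_lt_of_le ha with heq | hlt
    · subst heq
      exact base uf hInv hroot
    · have hcons : PySem.List.pyRange (a : Int) ((M : Nat) : Int) 1 =
          (a : Int) :: PySem.List.pyRange ((a : Int) + 1) ((M : Nat) : Int) 1 :=
        PySem.List.pyRange_one_cons (by exact_mod_cast hlt)
      have hgeta : PySem.Str.pyGet? S (a : Int) = L[a]? := by
        rw [hLdef, PySem.Str.pyGet?_natCast]
      have hcast1 : ((a + 1 : Nat) : Int) = (a : Int) + 1 := by push_cast; ring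
      rw [hcons]
      by_cases hAN : L[a]? = some 'N'
      · have hck : checkA fuel S N uf
            ((a : Int) :: PySem.List.pyRange ((a : Int) + 1) ((M : Nat) : Int) 1) =
            if (findA fuel uf (a : Int)).1 =
              (findA fuel (findA fuel uf (a : Int)).2 ((a : Int) + 1)).1
            then "NO"
            else checkA fuel S N (findA fuel (findA fuel uf (a : Int)).2 ((a : Int) + 1)).2
              (PySem.List.pyRange ((a : Int) + 1) ((M : Nat) : Int) 1) := by
          show (if PySem.Str.pyGet? S (a : Int) = some 'N' then _ else _) = _
          rw [hgeta, if_pos hAN]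
        rw [hck]
        obtain ⟨ei, hInv2, hpres2⟩ := findA_spec N fuel uf (a : Int) hInv (by positivity)
          (by omega)
        obtain ⟨ej, hInv3, hpres3⟩ := findA_spec N fuel (findA fuel uf (a : Int)).2
          ((a : Int) + 1) hInv2 (by positivity) (by omega)
        rw [hroot (a : Int)] at ei
        rw [hpres2 ((a : Int) + 1), hroot ((a : Int) + 1)] at ej
        have hroot3 : ∀ z, rootP (ufView (findA fuel (findA fuel uf (a : Int)).2
            ((a : Int) + 1)).2) N z = R z := by
          intro z
          rw [hpres3 z, hpres2 z, hroot z]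
        by_cases heq2 : (findA fuel uf (a : Int)).1 =
            (findA fuel (findA fuel uf (a : Int)).2 ((a : Int) + 1)).1
        · rw [if_pos heq2]
          refine ⟨?_, Or.inl rfl⟩
          simp only [true_iff]
          exact Or.inl ⟨a, le_rfl, hlt, hAN, by rw [← ei, ← ej]; exact heq2⟩
        · rw [if_neg heq2]
          obtain ⟨ihiff, ihval⟩ := ih (a + 1)
            (findA fuel (findA fuel uf (a : Int)).2 ((a : Int) + 1)).2
            (by omega) (by omega) hInv3 hroot3
          rw [hcast1] at ihiff ihval
          refine ⟨?_, ihval⟩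
          rw [ihiff]
          constructor
          · rintro (⟨i, h1, h2, h3, h4⟩ | h)
            · exact Or.inl ⟨i, by omega, h2, h3, h4⟩
            · exact Or.inr h
          · rintro (⟨i, h1, h2, h3, h4⟩ | h)
            · rcases Nat.eq_or_lt_of_le h1 with he | hlt2
              · exfalso
                apply heq2
                rw [ei, ej, he]
                exact h4
              · exact Or.inl ⟨i, by omega, h2, h3, h4⟩
            · exact Or.inr h
      · have hck : checkA fuel S N uf
            ((a : Int) :: PySem.List.pyRange ((a : Int) + 1) ((M : Nat) : Int) 1) =
            checkA fuel S N uf (PySem.List.pyRange ((a : Int) + 1) ((M : Nat) : Int) 1) := by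
          show (if PySem.Str.pyGet? S (a : Int) = some 'N' then _ else _) = _
          rw [hgeta, if_neg hAN]
        rw [hck]
        obtain ⟨ihiff, ihval⟩ := ih (a + 1) uf (by omega) (by omega) hInv hroot
        rw [hcast1] at ihiff ihval
        refine ⟨?_, ihval⟩
        rw [ihiff]
        constructor
        · rintro (⟨i, h1, h2, h3, h4⟩ | h)
          · exact Or.inl ⟨i, by omega, h2, h3, h4⟩
          · exact Or.inr h
        · rintro (⟨i, h1, h2, h3, h4⟩ | h)
          · rcases Nat.eq_or_lt_of_le h1 with he | hlt2
            · exact absurd (he ▸ h3) hAN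
            · exact Or.inl ⟨i, by omega, h2, h3, h4⟩
          · exact Or.inr h

theorem rbF_natCast (L : List Char) (M i : Nat) :
    rbF L M (i : Int) = ((runEnd L M i : Nat) : Int) := by
  rw [rbF, if_pos (by positivity)]
  simp only [Int.toNat_natCast]

theorem rbF_natCast_add_one (L : List Char) (M i : Nat) :
    rbF L M ((i : Int) + 1) = ((runEnd L M (i + 1) : Nat) : Int) := by
  rw [rbF, if_pos (by positivity)]
  have h : ((i : Int) + 1).toNat = i + 1 := by omega
  rw [h]

theorem rbF_zero (L : List Char) (M : Nat) :
    rbF L M 0 = ((runEnd L M 0 : Nat) : Int) := by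
  rw [rbF, if_pos le_rfl]
  rfl

theorem runEnd_of_N (L : List Char) (M i : Nat) (h : L[i]? = some 'N') :
    runEnd L M i = i := by
  rw [runEnd, dif_neg]
  rintro ⟨_, hE⟩
  rw [h] at hE
  exact absurd hE (by decide)

theorem runEnd_self (L : List Char) (M : Nat) : runEnd L M M = M := by
  rw [runEnd, dif_neg (by omega)]

-- the wrap edge is absent (last char not 'E'): inconsistent iff the single 'N' is the
-- last edge and all the others are 'E'
theorem plainR_no_iff (L : List Char) (M : Nat) (hM : L.length = M + 1)
    (hlastE : L[M]? ≠ some 'E') :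
    ((∃ i : Nat, 0 ≤ i ∧ i < M ∧ L[i]? = some 'N' ∧
        rbF L M (i : Int) = rbF L M ((i : Int) + 1)) ∨
     (L[M]? = some 'N' ∧ rbF L M 0 = rbF L M ((M : Nat) : Int))) ↔
    (L.count 'N' = 1 ∧ L.count 'E' + 1 = L.length) := by
  constructor
  · rintro (⟨i, _, hiM, hiN, hReq⟩ | ⟨hMN, hReq⟩)
    · exfalso
      rw [rbF_natCast, rbF_natCast_add_one, runEnd_of_N L M i hiN] at hReq
      have h1 : i = runEnd L M (i + 1) := by exact_mod_cast hReq
      have h2 := runEnd_ge L M (i + 1)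
      omega
    · rw [counts_iff]
      rw [rbF_zero, rbF_natCast, runEnd_self] at hReq
      have hre0 : runEnd L M 0 = M := by exact_mod_cast hReq
      have hallE := (runEnd_eq_bound_iff L M 0 (by omega)).1 hre0
      refine ⟨M, by omega, hMN, ?_⟩
      intro k hk hkM
      exact hallE k (Nat.zero_le k) (by omega)
  · intro hc
    obtain ⟨i, hiLen, hiN, hall⟩ := (counts_iff L).1 hc
    have hiM : i = M := by
      by_contra hne
      exact hlastE (hall M (by omega) (fun h => hne h.symm))
    refine Or.inr ⟨by rw [← hiM]; exact hiN, ?_⟩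
    rw [rbF_zero, rbF_natCast, runEnd_self]
    have hre0 : runEnd L M 0 = M :=
      (runEnd_eq_bound_iff L M 0 (by omega)).2 (fun k _ hk => hall k (by omega) (by omega))
    rw [hre0]


-- the wrap edge is present (last char 'E'): inconsistent iff some single 'N' edge has
-- every other edge 'E'
theorem wrapR_no_iff (L : List Char) (M : Nat) (hM : L.length = M + 1)
    (hlastE : L[M]? = some 'E') :
    ((∃ i : Nat, 0 ≤ i ∧ i < M ∧ L[i]? = some 'N' ∧
        wrapR L M (i : Int) = wrapR L M ((i : Int) + 1)) ∨
     (L[M]? = some 'N' ∧ wrapR L M 0 = wrapR L M ((M : Nat) : Int))) ↔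
    (L.count 'N' = 1 ∧ L.count 'E' + 1 = L.length) := by
  constructor
  · rintro (⟨i, _, hiM, hiN, hReq⟩ | ⟨hbad, _⟩)
    · simp only [wrapR] at hReq
      rw [rbF_natCast, rbF_natCast_add_one, rbF_zero, runEnd_of_N L M i hiN] at hReq
      have hge1 := runEnd_ge L M (i + 1)
      have hle1 := runEnd_le L M (i + 1) (by omega)
      by_cases h0 : runEnd L M 0 = i
      · have hne2 : ¬ (((runEnd L M (i + 1) : Nat) : Int) = ((runEnd L M 0 : Nat) : Int)) := by
          intro h
          have hh : runEnd L M (i + 1) = runEnd L M 0 := by exact_mod_cast h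
          omega
        rw [if_pos (by exact_mod_cast h0.symm), if_neg hne2] at hReq
        have hre1 : runEnd L M (i + 1) = M := by exact_mod_cast hReq.symm
        rw [counts_iff]
        have hbefore := runEnd_between L M 0
        have hafter := (runEnd_eq_bound_iff L M (i + 1) (by omega)).1 hre1
        refine ⟨i, by omega, hiN, ?_⟩
        intro k hk hki
        rcases Nat.lt_trichotomy k i with hlt | heq | hgt
        · exact (hbefore k (Nat.zero_le k) (by omega)).2
        · exact absurd heq hki
        · rcases Nat.lt_or_ge k M with hkM | hkM
          · exact hafter k (by omega) hkM
          · have : k = M := by omega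
            rw [this]
            exact hlastE
      · rw [if_neg (by intro h; exact h0 (by exact_mod_cast h.symm))] at hReq
        exfalso
        by_cases h1 : runEnd L M (i + 1) = runEnd L M 0
        · rw [if_pos (by exact_mod_cast h1)] at hReq
          have : (i : Int) < (M : Int) := by exact_mod_cast hiM
          omega
        · rw [if_neg (by intro h; exact h1 (by exact_mod_cast h))] at hReq
          have : i = runEnd L M (i + 1) := by exact_mod_cast hReq
          omega
    · rw [hlastE] at hbad
      exact absurd hbad (by decide)
  · intro hc
    obtain ⟨i, hiLen, hiN, hall⟩ := (counts_iff L).1 hc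
    have hiM : i < M := by
      rcases Nat.lt_or_ge i M with h | h
      · exact h
      · exfalso
        have : i = M := by omega
        rw [this, hlastE] at hiN
        exact absurd hiN (by decide)
    have hre0 : runEnd L M 0 = i := by
      apply runEnd_of_allE L M 0 i (Nat.zero_le i)
      · intro k _ hk
        exact ⟨by omega, hall k (by omega) (by omega)⟩
      · rintro ⟨_, hE⟩
        rw [hiN] at hE
        exact absurd hE (by decide)
    have hre1 : runEnd L M (i + 1) = M :=
      (runEnd_eq_bound_iff L M (i + 1) (by omega)).2
        (fun k hk1 hk2 => hall k (by omega) (by omega))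
    refine Or.inl ⟨i, Nat.zero_le i, hiM, hiN, ?_⟩
    simp only [wrapR]
    rw [rbF_natCast, rbF_natCast_add_one, rbF_zero, runEnd_of_N L M i hiN, hre0, hre1]
    split_ifs with h1 h2
    · rfl
    · rfl
    · exact absurd rfl h1
    · exact absurd rfl h1

-- ===== VERDICT (by name: the statement is the Claim_ definition above) =====
theorem solution_spec : Claim_equal_solution := by
  intro S _ hpre
  unfold Pre_solution at hpre
  show solution S = solution_alt S
  obtain ⟨M, hM⟩ : ∃ M, S.toList.length = M + 1 := by
    cases hL : S.toList with
    | nil => exact absurd hL hpre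
    | cons c t => exact ⟨t.length, by simp⟩
  have hN : PySem.Str.len S = (M : Int) + 1 := by
    rw [PySem.Str.len_eq, hM]; push_cast; ring
  have hM1 : PySem.Str.len S - 1 = ((M : Nat) : Int) := by omega
  have hfuel : S.toList.length + 1 = M + 2 := by omega
  have hBN : PySem.Str.count S "N" = S.toList.count 'N' := by
    rw [PySem.Str.count_eq]
    have h : ("N" : String).toList = ['N'] := rfl
    rw [h, chars_count_singleton]
  have hBE : PySem.Str.count S "E" = S.toList.count 'E' := by
    rw [PySem.Str.count_eq]
    have h : ("E" : String).toList = ['E'] := rfl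
    rw [h, chars_count_singleton]
  have hBiff : solution_alt S = "NO" ↔
      (S.toList.count 'N' = 1 ∧ S.toList.count 'E' + 1 = S.toList.length) := by
    unfold solution_alt
    rw [hBN, hBE, PySem.Str.len_eq]
    split_ifs with h
    · exact ⟨fun _ => ⟨h.1, by have := h.2; omega⟩, fun _ => rfl⟩
    · constructor
      · intro hbad; exact absurd hbad (by decide)
      · intro hc; exact absurd ⟨hc.1, by omega⟩ h
  have hBvals : solution_alt S = "NO" ∨ solution_alt S = "YES" := by
    unfold solution_alt
    split_ifs
    · exact Or.inl rfl
    · exact Or.inr rfl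
  have hsol : solution S = checkA (S.toList.length + 1) S (PySem.Str.len S)
      (if PySem.Str.pyGet? S (PySem.Str.len S - 1) = some 'E'
       then unionA (S.toList.length + 1)
         (unionA (S.toList.length + 1)
           ((PySem.List.pyRange 0 (PySem.Str.len S - 1) 1).foldl
             (fun uf i =>
               let uf' := unionA (S.toList.length + 1) uf i i
               if PySem.Str.pyGet? S i = some 'E' then
                 unionA (S.toList.length + 1) uf' i (i + 1) else uf')
             PySem.Dict.empty)
           (PySem.Str.len S - 1) (PySem.Str.len S - 1))
         0 (PySem.Str.len S - 1)
       else unionA (S.toList.length + 1)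
         ((PySem.List.pyRange 0 (PySem.Str.len S - 1) 1).foldl
           (fun uf i =>
             let uf' := unionA (S.toList.length + 1) uf i i
             if PySem.Str.pyGet? S i = some 'E' then
               unionA (S.toList.length + 1) uf' i (i + 1) else uf')
           PySem.Dict.empty)
         (PySem.Str.len S - 1) (PySem.Str.len S - 1))
      (PySem.List.pyRange 0 (PySem.Str.len S - 1) 1) := rfl
  rw [hsol, hM1, hfuel]
  obtain ⟨hInv0, hroot0⟩ := buildA_spec S S.toList rfl M (PySem.Str.len S) hN (M + 2) rfl
    M le_rfl
  set ufB := (PySem.List.pyRange 0 ((M : Nat) : Int) 1).foldl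
      (fun uf i =>
        let uf' := unionA (M + 2) uf i i
        if PySem.Str.pyGet? S i = some 'E' then unionA (M + 2) uf' i (i + 1) else uf')
      PySem.Dict.empty with hufB
  obtain ⟨hInv1, hroot1'⟩ := unionA_spec (PySem.Str.len S) (M + 2) ufB ((M : Nat) : Int)
    ((M : Nat) : Int) hInv0 (by positivity) (by positivity) (by omega)
    (by omega) (by omega) le_rfl
  have hroot1 : ∀ z, rootP (ufView (unionA (M + 2) ufB ((M : Nat) : Int) ((M : Nat) : Int)))
      (PySem.Str.len S) z = rbF S.toList M z := by
    intro z
    rw [hroot1' z]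
    simp only [hroot0]
    split_ifs with h
    · rw [← h]
    · rfl
  have hrbM : rbF S.toList M ((M : Nat) : Int) = ((M : Nat) : Int) := by
    rw [rbF_natCast, runEnd_self]
  by_cases hlast : PySem.Str.pyGet? S ((M : Nat) : Int) = some 'E'
  · rw [if_pos hlast]
    have hlastL : S.toList[M]? = some 'E' := by
      rw [PySem.Str.pyGet?_natCast] at hlast
      exact hlast
    obtain ⟨hInv2, hroot2'⟩ := unionA_spec (PySem.Str.len S) (M + 2)
      (unionA (M + 2) ufB ((M : Nat) : Int) ((M : Nat) : Int)) 0 ((M : Nat) : Int) hInv1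
      le_rfl (by positivity) (by omega) (by omega) (by omega)
      (by rw [hroot1 0, hroot1 ((M : Nat) : Int), rbF_zero, hrbM]
          have h := runEnd_le S.toList M 0 (Nat.zero_le M)
          exact_mod_cast h)
    have hroot2 : ∀ z, rootP (ufView (unionA (M + 2)
        (unionA (M + 2) ufB ((M : Nat) : Int) ((M : Nat) : Int)) 0 ((M : Nat) : Int)))
        (PySem.Str.len S) z = wrapR S.toList M z := by
      intro z
      rw [hroot2' z]
      simp only [hroot1]
      rw [hrbM]
      simp only [wrapR]
    obtain ⟨hiff, hval⟩ := checkA_spec S S.toList rfl M hM (PySem.Str.len S) hN (M + 2) rfl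
      (wrapR S.toList M) M 0 (unionA (M + 2)
        (unionA (M + 2) ufB ((M : Nat) : Int) ((M : Nat) : Int)) 0 ((M : Nat) : Int))
      (by omega) (Nat.zero_le M) hInv2 hroot2
    rw [Nat.cast_zero] at hiff hval
    rw [wrapR_no_iff S.toList M hM hlastL] at hiff
    rcases hval with hNO | hYES
    · rw [hNO]
      exact (hBiff.mpr (hiff.mp hNO)).symm
    · rw [hYES]
      rcases hBvals with hB | hB
      · exfalso
        have h := hiff.mpr (hBiff.mp hB)
        rw [hYES] at h
        exact absurd h (by decide)
      · rw [hB]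
  · rw [if_neg hlast]
    have hlastL : S.toList[M]? ≠ some 'E' := by
      rw [PySem.Str.pyGet?_natCast] at hlast
      exact hlast
    obtain ⟨hiff, hval⟩ := checkA_spec S S.toList rfl M hM (PySem.Str.len S) hN (M + 2) rfl
      (rbF S.toList M) M 0 (unionA (M + 2) ufB ((M : Nat) : Int) ((M : Nat) : Int))
      (by omega) (Nat.zero_le M) hInv1 hroot1
    rw [Nat.cast_zero] at hiff hval
    rw [plainR_no_iff S.toList M hM hlastL] at hiff
    rcases hval with hNO | hYES
    · rw [hNO]
      exact (hBiff.mpr (hiff.mp hNO)).symm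
    · rw [hYES]
      rcases hBvals with hB | hB
      · exfalso
        have h := hiff.mpr (hBiff.mp hB)
        rw [hYES] at h
        exact absurd h (by decide)
      · rw [hB]
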